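-- pv_equiv track=rewrite | github.com/ACFHarbinger/WSmartPlus-Route | logic/src/policies/lin_kernighan_helsgaun_three/popmusic.py | decompose_tour
-- ===== SOURCE A (Python) =====
-- from typing import Dict, List, Optional, Set, Tuple
--
-- def decompose_tour(
--     tour: List[int],
--     subpath_size: int,
--     overlap: int = 5,
-- ) -> List[List[int]]:
--     """Decompose a closed tour into overlapping sub-paths.
--
--     Each sub-path contains `subpath_size` consecutive nodes from the tour.
--     Successive sub-paths overlap by `overlap` nodes so that edges near
--     sub-path boundaries can still participate in local optimization.
--
--     Args:
--         tour: Closed tour (first node repeated at end).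
--         subpath_size: Number of nodes per sub-path (r).
--         overlap: Number of overlapping nodes between successive sub-paths.
--
--     Returns:
--         List of sub-path node lists.
--     """
--     # Work with the open tour (no closing duplicate)
--     open_tour = tour[:-1] if len(tour) > 1 and tour[0] == tour[-1] else tour[:]
--     n = len(open_tour)
--
--     if n <= subpath_size:
--         return [open_tour[:]]
--
--     step = max(1, subpath_size - overlap)
--     subpaths: List[List[int]] = []
--
--     for start in range(0, n, step):
--         end = start + subpath_size
--         if end <= n:
--             subpaths.append(open_tour[start:end])
--         else:
--             # Wrap around: take from end of tour + beginning
--             wrap = open_tour[start:] + open_tour[: end - n]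
--             subpaths.append(wrap)
--             # Do NOT break here --- continue until we've covered all nodes.
--             # The range termination at `n` handles stopping naturally.
--
--     return subpaths
-- ===== SOURCE B (Python) =====
-- from typing import List
--
-- def decompose_tour(
--     tour: List[int],
--     subpath_size: int,
--     overlap: int = 5,
-- ) -> List[List[int]]:
--     """Decompose a closed tour into overlapping sub-paths (sliding-delta version).
--
--     Instead of cutting every window out of the tour independently, derive each
--     window from the previous one: drop the first `step` nodes and append only
--     the new delta, fetched with clamped slices (a position past the end wraps
--     back to the start).
--     """
--     open_tour = tour[:-1] if len(tour) > 1 and tour[0] == tour[-1] else tour[:]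
--     n = len(open_tour)
--     if n <= subpath_size:
--         return [open_tour]
--     step = max(1, subpath_size - overlap)
--     w = open_tour[:subpath_size]
--     subpaths = [w]
--     for s in range(step, n, step):
--         lo = max(s - step + subpath_size, s)   # first position not yet in the window
--         hi = s + subpath_size                  # one past the window's last position
--         w = w[step:]
--         w += open_tour[lo:min(hi, n)]
--         w += open_tour[max(lo - n, 0):max(hi - n, 0)]
--         subpaths.append(w)
--     return subpaths
-- ===== Notes on version B (the rewrite author's own statement) =====
-- stated objective: alternative
-- what changed: B derives each window from the previous one by dropping the first step nodes and appending only the new delta via clamped slices, instead of A's independent re-slicing of every window with a per-window wrap-around if/else.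
-- outside the precondition, e.g. on decompose_tour([1, 2, 3, 1], -1, 0): A returns [[1, 2], [], []], B returns [[1, 2], [2], []]; on decompose_tour([], -1, 0): A returns [], B returns [[]]
import Mathlib
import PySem

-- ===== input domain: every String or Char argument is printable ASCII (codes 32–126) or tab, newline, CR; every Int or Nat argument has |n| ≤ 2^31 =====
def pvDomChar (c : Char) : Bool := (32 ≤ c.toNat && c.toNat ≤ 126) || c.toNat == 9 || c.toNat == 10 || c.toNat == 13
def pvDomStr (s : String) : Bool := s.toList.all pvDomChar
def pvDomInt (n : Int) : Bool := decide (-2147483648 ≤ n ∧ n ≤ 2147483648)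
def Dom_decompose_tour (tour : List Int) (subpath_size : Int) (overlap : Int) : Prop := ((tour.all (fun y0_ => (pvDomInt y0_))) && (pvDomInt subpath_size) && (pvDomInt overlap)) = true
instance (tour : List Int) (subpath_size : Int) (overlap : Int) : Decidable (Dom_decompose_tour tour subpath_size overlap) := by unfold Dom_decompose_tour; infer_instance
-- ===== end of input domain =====

-- B derives each window from the previous one, dropping the first step nodes and appending
-- only the new delta via clamped slices, instead of A's independent re-slicing of every
-- window with a per-window wrap-around if/else (objective: alternative).

-- ===== PORT A =====
-- open_tour = tour[:-1] if len(tour) > 1 and tour[0] == tour[-1] else tour[:]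
def pvOpenTour (tour : List Int) : List Int :=
  if 1 < tour.length ∧ PySem.List.pyGet? tour 0 = PySem.List.pyGet? tour (-1) then
    PySem.List.slice tour none (some (-1))
  else
    PySem.List.slice tour none none

-- the for-loop of A: append either the plain slice or the wrap-around concatenation
def pvLoopA (ot : List Int) (subpath_size overlap : Int) : List (List Int) :=
  (PySem.List.pyRange 0 ot.length (max 1 (subpath_size - overlap))).foldl
    (fun subpaths start =>
      if start + subpath_size ≤ (ot.length : Int) then
        subpaths ++ [PySem.List.slice ot (some start) (some (start + subpath_size))]
      else
        subpaths ++ [PySem.List.slice ot (some start) none ++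
                     PySem.List.slice ot none (some (start + subpath_size - ot.length))])
    []

def decompose_tour (tour : List Int) (subpath_size : Int) (overlap : Int) : List (List Int) :=
  if ((pvOpenTour tour).length : Int) ≤ subpath_size then
    [PySem.List.slice (pvOpenTour tour) none none]
  else
    pvLoopA (pvOpenTour tour) subpath_size overlap

-- ===== PORT B =====
-- the delta of B's loop body: positions [lo, hi) of the tour, a position past the end
-- wrapping back to the start, fetched as two clamped slices (exactly the Python slices)
def pvChunk (ot : List Int) (lo hi : Int) : List Int :=
  PySem.List.slice ot (some lo) (some (min hi (ot.length : Int))) ++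
  PySem.List.slice ot (some (max (lo - ot.length) 0)) (some (max (hi - ot.length) 0))

-- one iteration of B's loop: shift the previous window by step and append the delta
def pvStepB (ot : List Int) (ss step : Int) (st : List (List Int) × List Int) (s : Int) :
    List (List Int) × List Int :=
  let w := PySem.List.slice st.2 (some step) none ++
           pvChunk ot (max (s - step + ss) s) (s + ss)
  (st.1 ++ [w], w)

-- B's loop 'for s in range(step, n, step)' carrying (subpaths, w)
def pvLoopB (ot : List Int) (ss step : Int) : List (List Int) :=
  ((PySem.List.pyRange step (ot.length : Int) step).foldl (pvStepB ot ss step)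
    ([PySem.List.slice ot none (some ss)], PySem.List.slice ot none (some ss))).1

def decompose_tour_alt (tour : List Int) (subpath_size : Int) (overlap : Int) : List (List Int) :=
  if ((pvOpenTour tour).length : Int) ≤ subpath_size then
    [pvOpenTour tour]
  else
    pvLoopB (pvOpenTour tour) subpath_size (max 1 (subpath_size - overlap))

-- ===== PRECONDITION & SPEC =====
-- the open tour's length, as a closed form on the input (kept independent of the ports)
def pvOpenLen (tour : List Int) : Int :=
  if 1 < tour.length ∧ PySem.List.pyGet? tour 0 = PySem.List.pyGet? tour (-1) then
    tour.length - 1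
  else
    tour.length

-- Pre_ admits every window size ≥ 0 and, below the natural domain (a meaningless NEGATIVE
-- window size), the inputs where both programs return all-empty windows; it excludes the
-- remaining negative sizes, where A's negative-stop slices and B's delta recurrence give
-- two different unspecified values (examples in the header cites).
def Pre_decompose_tour (tour : List Int) (subpath_size : Int) (overlap : Int) : Prop :=
  0 ≤ subpath_size ∨ (0 < pvOpenLen tour ∧ pvOpenLen tour + subpath_size ≤ 0)
instance (tour : List Int) (subpath_size : Int) (overlap : Int) : Decidable (Pre_decompose_tour tour subpath_size overlap) := by unfold Pre_decompose_tour; infer_instance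

def pvWitness_decompose_tour : List Int × Int × Int := ([1, 2, 3, 4, 1], 3, 1)

def Spec_decompose_tour (tour : List Int) (subpath_size : Int) (overlap : Int) (out : List (List Int)) : Prop := out = decompose_tour_alt tour subpath_size overlap
instance (tour : List Int) (subpath_size : Int) (overlap : Int) (out : List (List Int)) : Decidable (Spec_decompose_tour tour subpath_size overlap out) := by unfold Spec_decompose_tour; infer_instance

-- ===== CLAIM =====
def Claim_equal_decompose_tour : Prop := ∀ (tour : List Int) (subpath_size : Int) (overlap : Int), Dom_decompose_tour tour subpath_size overlap → Pre_decompose_tour tour subpath_size overlap → Spec_decompose_tour tour subpath_size overlap (decompose_tour tour subpath_size overlap)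

-- ===== LEMMAS AND PROOFS =====

-- A's per-iteration window as a function of the start index (exactly the fold body's value).
def pvWindowA (ot : List Int) (ss : Int) (start : Int) : List Int :=
  if start + ss ≤ (ot.length : Int) then PySem.List.slice ot (some start) (some (start + ss))
  else PySem.List.slice ot (some start) none ++
       PySem.List.slice ot none (some (start + ss - ot.length))

-- the wrapped read at position p: from the open tour, a position past the end wraps back.
def pvE (ot : List Int) (p : Int) : Int :=
  if p < (ot.length : Int) then PySem.List.pyGetD ot p 0
  else PySem.List.pyGetD ot (p - ot.length) 0

theorem pv_loopA_eq_map (ot : List Int) (ss ov : Int) :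
    pvLoopA ot ss ov =
      (PySem.List.pyRange 0 ot.length (max 1 (ss - ov))).map (pvWindowA ot ss) := by
  unfold pvLoopA
  rw [show (fun (subpaths : List (List Int)) (start : Int) =>
        if start + ss ≤ (ot.length : Int) then
          subpaths ++ [PySem.List.slice ot (some start) (some (start + ss))]
        else
          subpaths ++ [PySem.List.slice ot (some start) none ++
                       PySem.List.slice ot none (some (start + ss - ot.length))]) =
      (fun subpaths start => subpaths ++ [pvWindowA ot ss start]) from by
    funext acc st; unfold pvWindowA; split_ifs <;> rfl]
  rw [PySem.List.foldl_append_singleton_eq_map, List.nil_append]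

-- a block of consecutive reads is a take of a drop
theorem pv_map_range_getD (l : List Int) (s m : Nat) (h : s + m ≤ l.length) :
    (List.range m).map (fun j => l.getD (s + j) 0) = List.take m (List.drop s l) := by
  apply List.ext_getElem
  · simp only [List.length_map, List.length_range, List.length_take, List.length_drop]
    omega
  · intro i h1 h2
    simp only [List.length_map, List.length_range] at h1
    simp only [List.getElem_map, List.getElem_range, List.getElem_take, List.getElem_drop]
    rw [List.getD_eq_getElem _ _ (by omega)]

-- range(a, b, s) for positive s: nil and cons forms
theorem pv_pyRange_pos_nil (a b s : Int) (hab : b ≤ a) (hs : 0 < s) :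
    PySem.List.pyRange a b s = [] := by
  rw [PySem.List.pyRange_of_pos a b hs, if_neg (by omega)]
  simp

theorem pv_pyRange_pos_cons (a b s : Int) (hab : a < b) (hs : 0 < s) :
    PySem.List.pyRange a b s = a :: PySem.List.pyRange (a + s) b s := by
  rw [PySem.List.pyRange_of_pos a b hs, PySem.List.pyRange_of_pos (a + s) b hs, if_pos hab]
  by_cases h2 : a + s < b
  · rw [if_pos h2]
    have hcnt : ((b - a + s - 1) / s).toNat = ((b - (a + s) + s - 1) / s).toNat + 1 := by
      have he : b - a + s - 1 = (b - (a + s) + s - 1) + 1 * s := by ring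
      have h1 : 0 ≤ (b - (a + s) + s - 1) / s := Int.ediv_nonneg (by omega) (by omega)
      rw [he, Int.add_mul_ediv_right _ _ (by omega : s ≠ 0)]
      omega
    rw [hcnt, List.range_succ_eq_map, List.map_cons, List.map_map]
    refine congrArg₂ _ (by ring) (List.map_congr_left fun k _ => ?_)
    simp only [Function.comp_apply]
    push_cast
    ring
  · rw [if_neg h2]
    have hq : ((b - a + s - 1) / s) = 1 := by
      have hq1 : 1 ≤ (b - a + s - 1) / s := by
        rw [Int.le_ediv_iff_mul_le (by omega)]; omega
      have hq2 : (b - a + s - 1) / s < 2 := by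
        rw [Int.ediv_lt_iff_lt_mul (by omega)]; omega
      omega
    rw [hq]
    simp

-- dropping from a range shifts it
theorem pv_drop_range (m k : Nat) :
    List.drop m (List.range k) = (List.range (k - m)).map (fun i => m + i) := by
  apply List.ext_getElem
  · simp
  · intro i h1 h2
    simp only [List.length_drop, List.length_range] at h1
    simp [List.getElem_drop, List.getElem_range]

-- the two clamped slices of B's delta read exactly the wrapped positions [lo, hi)
theorem pv_reads (ot : List Int) (lo hi : Int) (hlo : 0 ≤ lo) (hlh : lo ≤ hi)
    (hwrap : hi - (ot.length : Int) ≤ lo) (h2n : hi ≤ 2 * (ot.length : Int)) :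
    pvChunk ot lo hi =
      (List.range (hi - lo).toNat).map (fun (t : Nat) => pvE ot (lo + (t : Int))) := by
  obtain ⟨loN, rfl⟩ := Int.eq_ofNat_of_zero_le hlo
  obtain ⟨hiN, rfl⟩ := Int.eq_ofNat_of_zero_le (le_trans hlo hlh)
  have hlhN : loN ≤ hiN := by exact_mod_cast hlh
  unfold pvChunk
  by_cases hcase1 : hiN ≤ ot.length
  · -- no wrap: the second slice is empty
    rw [show min ((hiN : Nat) : Int) ((ot.length : Int)) = ((hiN : Nat) : Int) by omega,
      show max (((loN : Nat) : Int) - (ot.length : Int)) 0 = ((0 : Nat) : Int) by omega,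
      show max (((hiN : Nat) : Int) - (ot.length : Int)) 0 = ((0 : Nat) : Int) by omega,
      PySem.List.slice_natCast, PySem.List.slice_natCast]
    simp only [Nat.sub_self, List.take_zero, List.append_nil]
    rw [show (((hiN : Nat) : Int) - ((loN : Nat) : Int)).toNat = hiN - loN by omega,
      ← pv_map_range_getD ot loN (hiN - loN) (by omega)]
    refine List.map_congr_left fun t ht => ?_
    have htlt : t < hiN - loN := List.mem_range.mp ht
    unfold pvE
    rw [if_pos (by omega : ((loN : Int) + (t : Int)) < (ot.length : Int)),
      show (loN : Int) + (t : Int) = ((loN + t : Nat) : Int) by push_cast; ring,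
      PySem.List.pyGetD_natCast]
  · by_cases hcase2 : loN ≤ ot.length
    · -- wraps once, split between the two slices
      rw [show min ((hiN : Nat) : Int) ((ot.length : Int)) = ((ot.length : Nat) : Int) by omega,
        show max (((loN : Nat) : Int) - (ot.length : Int)) 0 = ((0 : Nat) : Int) by omega,
        show max (((hiN : Nat) : Int) - (ot.length : Int)) 0 =
          ((hiN - ot.length : Nat) : Int) by omega,
        PySem.List.slice_natCast, PySem.List.slice_natCast]
      rw [List.drop_zero,
        show (((hiN : Nat) : Int) - ((loN : Nat) : Int)).toNat = hiN - loN by omega,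
        show List.range (hiN - loN) =
          List.range (ot.length - loN) ++
            (List.range (hiN - ot.length)).map (fun x => ot.length - loN + x) by
          rw [← List.range_add]; congr 1; omega,
        List.map_append]
      congr 1
      · rw [← pv_map_range_getD ot loN (ot.length - loN) (by omega)]
        refine List.map_congr_left fun t ht => ?_
        have htlt : t < ot.length - loN := List.mem_range.mp ht
        unfold pvE
        rw [if_pos (by omega : ((loN : Int) + (t : Int)) < (ot.length : Int)),
          show (loN : Int) + (t : Int) = ((loN + t : Nat) : Int) by push_cast; ring,
          PySem.List.pyGetD_natCast]
      · rw [List.map_map, Nat.sub_zero,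
          show List.take (hiN - ot.length) ot =
            List.take (hiN - ot.length) (List.drop 0 ot) by rw [List.drop_zero],
          ← pv_map_range_getD ot 0 (hiN - ot.length) (by omega)]
        refine List.map_congr_left fun i hi => ?_
        have hilt : i < hiN - ot.length := List.mem_range.mp hi
        simp only [Function.comp_apply]
        unfold pvE
        rw [if_neg (by push_cast; omega),
          show (loN : Int) + ((ot.length - loN + i : Nat) : Int) - (ot.length : Int) =
            ((i : Nat) : Int) by push_cast; omega,
          PySem.List.pyGetD_natCast, Nat.zero_add]
    · -- entirely wrapped: the first slice is empty
      rw [show min ((hiN : Nat) : Int) ((ot.length : Int)) = ((ot.length : Nat) : Int) by omega,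
        show max (((loN : Nat) : Int) - (ot.length : Int)) 0 =
          ((loN - ot.length : Nat) : Int) by omega,
        show max (((hiN : Nat) : Int) - (ot.length : Int)) 0 =
          ((hiN - ot.length : Nat) : Int) by omega,
        PySem.List.slice_natCast, PySem.List.slice_natCast]
      rw [show ot.length - loN = 0 by omega, List.take_zero, List.nil_append,
        show hiN - ot.length - (loN - ot.length) = hiN - loN by omega,
        show (((hiN : Nat) : Int) - ((loN : Nat) : Int)).toNat = hiN - loN by omega,
        ← pv_map_range_getD ot (loN - ot.length) (hiN - loN) (by omega)]
      refine List.map_congr_left fun t ht => ?_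
      have htlt : t < hiN - loN := List.mem_range.mp ht
      unfold pvE
      rw [if_neg (by omega),
        show (loN : Int) + (t : Int) - (ot.length : Int) =
          ((loN - ot.length + t : Nat) : Int) by push_cast; omega,
        PySem.List.pyGetD_natCast]

-- A's window at start is exactly the list of wrapped reads there
theorem pv_window_eq_cols (ot : List Int) (ss st : Int) (hss0 : 0 ≤ ss)
    (hlt : ss < (ot.length : Int)) (hst0 : 0 ≤ st) (hstlt : st < (ot.length : Int)) :
    pvWindowA ot ss st = (List.range ss.toNat).map (fun (t : Nat) => pvE ot (st + (t : Int))) := by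
  obtain ⟨sN, rfl⟩ := Int.eq_ofNat_of_zero_le hst0
  obtain ⟨ssn, hssn⟩ : ∃ ssn : Nat, ss = (ssn : Int) := ⟨ss.toNat, (Int.toNat_of_nonneg hss0).symm⟩
  subst hssn
  have hsN : sN < ot.length := by exact_mod_cast hstlt
  have hssnN : ssn < ot.length := by exact_mod_cast hlt
  rw [Int.toNat_natCast]
  unfold pvWindowA
  by_cases hfit : sN + ssn ≤ ot.length
  · rw [if_pos (by exact_mod_cast hfit), PySem.List.slice_natCast_add,
      ← pv_map_range_getD ot sN ssn hfit]
    refine List.map_congr_left fun t ht => ?_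
    have htlt : t < ssn := List.mem_range.mp ht
    unfold pvE
    rw [if_pos (by omega : ((sN : Int) + (t : Int)) < (ot.length : Int)),
      show (sN : Int) + (t : Int) = ((sN + t : Nat) : Int) by push_cast; ring,
      PySem.List.pyGetD_natCast]
  · have hsplit : List.range ssn =
        List.range (ot.length - sN) ++
          (List.range (sN + ssn - ot.length)).map (fun x => ot.length - sN + x) := by
      rw [← List.range_add]
      congr 1
      omega
    rw [if_neg (by intro hc; exact hfit (by exact_mod_cast hc)),
      PySem.List.slice_from_natCast,
      show (sN : Int) + (ssn : Int) - (ot.length : Int) =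
        ((sN + ssn - ot.length : Nat) : Int) by omega,
      PySem.List.slice_to_natCast, hsplit, List.map_append]
    congr 1
    · rw [← List.take_of_length_le (l := List.drop sN ot) (by rw [List.length_drop]),
        ← pv_map_range_getD ot sN (ot.length - sN) (by omega)]
      refine List.map_congr_left fun t ht => ?_
      have htlt : t < ot.length - sN := List.mem_range.mp ht
      unfold pvE
      rw [if_pos (by omega : ((sN : Int) + (t : Int)) < (ot.length : Int)),
        show (sN : Int) + (t : Int) = ((sN + t : Nat) : Int) by push_cast; ring,
        PySem.List.pyGetD_natCast]
    · rw [List.map_map,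
        show List.take (sN + ssn - ot.length) ot =
          List.take (sN + ssn - ot.length) (List.drop 0 ot) by rw [List.drop_zero],
        ← pv_map_range_getD ot 0 (sN + ssn - ot.length) (by omega)]
      refine List.map_congr_left fun i hi => ?_
      have hilt : i < sN + ssn - ot.length := List.mem_range.mp hi
      simp only [Function.comp_apply]
      unfold pvE
      rw [if_neg (by push_cast; omega),
        show (sN : Int) + ((ot.length - sN + i : Nat) : Int) - (ot.length : Int) =
          ((i : Nat) : Int) by push_cast; omega,
        PySem.List.pyGetD_natCast, Nat.zero_add]

-- KEY: shifting the previous window by step and appending the delta gives the next window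
theorem pv_window_step (ot : List Int) (ss step s : Int) (hss0 : 0 ≤ ss)
    (hlt : ss < (ot.length : Int)) (hstep : 0 < step) (hs0 : step ≤ s)
    (hsn : s < (ot.length : Int)) :
    PySem.List.slice (pvWindowA ot ss (s - step)) (some step) none ++
      pvChunk ot (max (s - step + ss) s) (s + ss) = pvWindowA ot ss s := by
  rw [pv_window_eq_cols ot ss (s - step) hss0 hlt (by omega) (by omega),
    pv_window_eq_cols ot ss s hss0 hlt (by omega) hsn,
    PySem.List.slice_from _ hstep.le, ← List.map_drop, pv_drop_range,
    pv_reads ot _ _ (by omega) (by omega) (by omega) (by omega)]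
  have hm1 : (s + ss - max (s - step + ss) s).toNat = ss.toNat - (ss.toNat - step.toNat) := by
    omega
  have hlo : max (s - step + ss) s = s + ((ss.toNat - step.toNat : Nat) : Int) := by omega
  rw [hm1, hlo,
    show List.range ss.toNat =
      List.range (ss.toNat - step.toNat) ++
        (List.range (ss.toNat - (ss.toNat - step.toNat))).map
          (fun x => ss.toNat - step.toNat + x) from by
      rw [← List.range_add]; congr 1; omega,
    List.map_append, List.map_map, List.map_map]
  congr 1
  · refine List.map_congr_left fun i _ => ?_
    simp only [Function.comp_apply]
    exact congrArg (pvE ot) (by push_cast; omega)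
  · refine List.map_congr_left fun t _ => ?_
    simp only [Function.comp_apply]
    exact congrArg (pvE ot) (by push_cast; ring)

-- the loop of B produces A's windows for the remaining starts
theorem pv_fold (ot : List Int) (ss step : Int) (hss0 : 0 ≤ ss)
    (hlt : ss < (ot.length : Int)) (hstep : 0 < step) :
    ∀ (fuel : Nat) (s0 : Int) (acc : List (List Int)),
      ((ot.length : Int) - s0).toNat ≤ fuel → 0 < s0 → step ≤ s0 →
      ((PySem.List.pyRange s0 (ot.length : Int) step).foldl (pvStepB ot ss step)
          (acc, pvWindowA ot ss (s0 - step))).1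
        = acc ++ (PySem.List.pyRange s0 (ot.length : Int) step).map (pvWindowA ot ss) := by
  intro fuel
  induction fuel with
  | zero =>
    intro s0 acc hfuel hpos hstep_le
    rw [pv_pyRange_pos_nil _ _ _ (by omega) hstep]
    simp
  | succ f ih =>
    intro s0 acc hfuel hpos hstep_le
    by_cases hs : s0 < (ot.length : Int)
    · rw [pv_pyRange_pos_cons s0 _ step hs hstep, List.foldl_cons, List.map_cons]
      have hbody : pvStepB ot ss step (acc, pvWindowA ot ss (s0 - step)) s0 =
          (acc ++ [pvWindowA ot ss s0], pvWindowA ot ss s0) := by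
        unfold pvStepB
        rw [pv_window_step ot ss step s0 hss0 hlt hstep hstep_le hs]
      rw [hbody,
        show pvWindowA ot ss s0 = pvWindowA ot ss (s0 + step - step) by rw [add_sub_cancel_right]]
      rw [ih (s0 + step) (acc ++ [pvWindowA ot ss (s0 + step - step)]) (by omega) (by omega)
        (by omega)]
      simp [add_sub_cancel_right]
    · rw [pv_pyRange_pos_nil _ _ _ (by omega) hstep]
      simp

-- the open-tour helper of Pre_ measures exactly the port's open tour
theorem pv_openLen_eq (tour : List Int) :
    pvOpenLen tour = ((pvOpenTour tour).length : Int) := by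
  unfold pvOpenLen pvOpenTour
  split_ifs with hc
  · rw [PySem.List.slice_to_neg_one, List.length_dropLast]
    have : 1 < tour.length := hc.1
    omega
  · rw [PySem.List.slice_none_none]

-- a slice whose clamped stop is at or before its clamped start is empty
theorem pv_slice_empty (xs : List Int) (a b : Int)
    (h : PySem.List.clampIdx xs.length b ≤ PySem.List.clampIdx xs.length a) :
    PySem.List.slice xs (some a) (some b) = [] := by
  apply List.eq_nil_of_length_eq_zero
  rw [PySem.List.length_slice]
  omega

-- for a window size at most -n every window of A is empty
theorem pv_window_neg (ot : List Int) (ss s : Int) (hneg : (ot.length : Int) + ss ≤ 0)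
    (hs0 : 0 ≤ s) (hsn : s < (ot.length : Int)) :
    pvWindowA ot ss s = [] := by
  unfold pvWindowA
  rw [if_pos (by omega : s + ss ≤ (ot.length : Int))]
  exact pv_slice_empty ot s (s + ss)
    (by simp only [PySem.List.clampIdx]; split_ifs <;> omega)

-- …and B's loop body then carries an empty window along
theorem pv_stepB_empty (ot : List Int) (ss step s : Int) (acc : List (List Int))
    (hneg : (ot.length : Int) + ss ≤ 0) (hstep : 0 ≤ step) (hs0 : 0 ≤ s)
    (hsn : s < (ot.length : Int)) :
    pvStepB ot ss step (acc, []) s = (acc ++ [[]], []) := by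
  unfold pvStepB pvChunk
  rw [PySem.List.slice_from _ hstep, List.drop_nil,
    pv_slice_empty ot (max (s - step + ss) s) (min (s + ss) (ot.length : Int))
      (by simp only [PySem.List.clampIdx]; split_ifs <;> omega),
    pv_slice_empty ot (max (max (s - step + ss) s - ot.length) 0)
      (max (s + ss - ot.length) 0)
      (by simp only [PySem.List.clampIdx]; split_ifs <;> omega)]
  simp

theorem pv_fold_empty (ot : List Int) (ss step : Int) (hneg : (ot.length : Int) + ss ≤ 0)
    (hstep : 0 < step) :
    ∀ (fuel : Nat) (s0 : Int) (acc : List (List Int)),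
      ((ot.length : Int) - s0).toNat ≤ fuel → 0 ≤ s0 →
      ((PySem.List.pyRange s0 (ot.length : Int) step).foldl (pvStepB ot ss step) (acc, [])).1
        = acc ++ (PySem.List.pyRange s0 (ot.length : Int) step).map (fun _ => ([] : List Int)) := by
  intro fuel
  induction fuel with
  | zero =>
    intro s0 acc hfuel hs0
    rw [pv_pyRange_pos_nil _ _ _ (by omega) hstep]
    simp
  | succ f ih =>
    intro s0 acc hfuel hs0
    by_cases hs : s0 < (ot.length : Int)
    · rw [pv_pyRange_pos_cons s0 _ step hs hstep, List.foldl_cons, List.map_cons,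
        pv_stepB_empty ot ss step s0 acc hneg hstep.le hs0 hs,
        ih (s0 + step) (acc ++ [[]]) (by omega) (by omega)]
      simp
    · rw [pv_pyRange_pos_nil _ _ _ (by omega) hstep]
      simp

-- ===== VERDICT =====
theorem decompose_tour_spec : Claim_equal_decompose_tour := by
  intro tour ss ov _ hpre
  have hpre' : 0 ≤ ss ∨ (0 < pvOpenLen tour ∧ pvOpenLen tour + ss ≤ 0) := hpre
  rw [pv_openLen_eq] at hpre'
  by_cases hss0 : (0:Int) ≤ ss
  case neg =>
    -- negative window size with the open tour nonempty and short enough: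
    -- both programs return one empty window per start
    have hneg : 0 < ((pvOpenTour tour).length : Int) ∧
        ((pvOpenTour tour).length : Int) + ss ≤ 0 := by omega
    unfold Spec_decompose_tour decompose_tour decompose_tour_alt
    split_ifs with h
    · exact absurd h (by omega)
    · have hstep : (0:Int) < max 1 (ss - ov) := lt_of_lt_of_le one_pos (le_max_left _ _)
      have hw0 : PySem.List.slice (pvOpenTour tour) none (some ss) = [] := by
        rw [show ss = -(((-ss).toNat : Nat) : Int) by omega,
          PySem.List.slice_to_neg_natCast _ _ (by omega),
          show (pvOpenTour tour).length - (-ss).toNat = 0 by omega, List.take_zero]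
      unfold pvLoopB
      rw [pv_loopA_eq_map, hw0,
        pv_fold_empty (pvOpenTour tour) ss (max 1 (ss - ov)) hneg.2 hstep
          (pvOpenTour tour).length (max 1 (ss - ov)) _ (by omega) hstep.le,
        pv_pyRange_pos_cons 0 ((pvOpenTour tour).length : Int) (max 1 (ss - ov))
          (by omega) hstep,
        zero_add, List.map_cons, List.singleton_append,
        pv_window_neg (pvOpenTour tour) ss 0 hneg.2 le_rfl (by omega)]
      refine congrArg _ (List.map_congr_left fun st hst => ?_)
      obtain ⟨hst0, hstlt, -⟩ :=
        (PySem.List.mem_pyRange_iff_of_pos hstep st).mp hst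
      exact pv_window_neg (pvOpenTour tour) ss st hneg.2 (by omega) hstlt
  case pos =>
    unfold Spec_decompose_tour decompose_tour decompose_tour_alt
    split_ifs with h
    · rw [PySem.List.slice_none_none]
    · have hlt : ss < ((pvOpenTour tour).length : Int) := by omega
      have hstep : (0:Int) < max 1 (ss - ov) := lt_of_lt_of_le one_pos (le_max_left _ _)
      have hw0 : PySem.List.slice (pvOpenTour tour) none (some ss) =
          pvWindowA (pvOpenTour tour) ss 0 := by
        unfold pvWindowA
        rw [if_pos (by omega : (0:Int) + ss ≤ ((pvOpenTour tour).length : Int)), zero_add,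
          PySem.List.slice_zero_start]
      unfold pvLoopB
      rw [pv_loopA_eq_map, hw0,
        show pvWindowA (pvOpenTour tour) ss 0 =
          pvWindowA (pvOpenTour tour) ss (max 1 (ss - ov) - max 1 (ss - ov)) by rw [sub_self],
        pv_fold (pvOpenTour tour) ss (max 1 (ss - ov)) hss0 hlt hstep
          (pvOpenTour tour).length (max 1 (ss - ov)) _ (by omega) hstep (le_refl _),
        pv_pyRange_pos_cons 0 ((pvOpenTour tour).length : Int) (max 1 (ss - ov)) (by omega) hstep,
        zero_add, List.map_cons, List.singleton_append, sub_self]
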